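-- pv_equiv track=rewrite | github.com/sujon335/AlgebraicDatatypeTaintTracker | CFG_analyzer/Graph_analyzer_hashed_check.py | find_the_method_slice
-- ===== SOURCE A (Python) =====
-- def find_the_method_slice(alllines,num):
--     method_start_line=-1
--     methodName=""
--     while (num > 0):
--         text = alllines[num-1].strip()
--         if (text == "</graphml>"):
--             method_start_line=num+1
--             break
--         num=num-1
--     if method_start_line>0:
--         methodName=alllines[method_start_line-1].strip()
--     return methodName,method_start_line
-- ===== SOURCE B (Python) =====
-- def find_the_method_slice(alllines, num):
--     # Forward full pass tracking the last "</graphml>" marker index,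
--     # instead of A's backward scan with early break.
--     last_idx = -1
--     for i in range(num):
--         if alllines[i].strip() == "</graphml>":
--             last_idx = i
--     if last_idx >= 0:
--         method_start_line = last_idx + 2
--         return alllines[method_start_line - 1].strip(), method_start_line
--     return "", -1
-- ===== Notes on version B (the rewrite author's own statement) =====
-- stated objective: alternative
-- what changed: Replaces A's backward while-loop with early break by a single forward pass over range(num) that tracks the last index whose stripped line equals "</graphml>", then derives the method line from that index.
-- outside the precondition, e.g. on find_the_method_slice(['x'], 2): A raises IndexError, B raises IndexError; on find_the_method_slice(['</graphml>'], 1): A raises IndexError, B raises IndexError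
import Mathlib
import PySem

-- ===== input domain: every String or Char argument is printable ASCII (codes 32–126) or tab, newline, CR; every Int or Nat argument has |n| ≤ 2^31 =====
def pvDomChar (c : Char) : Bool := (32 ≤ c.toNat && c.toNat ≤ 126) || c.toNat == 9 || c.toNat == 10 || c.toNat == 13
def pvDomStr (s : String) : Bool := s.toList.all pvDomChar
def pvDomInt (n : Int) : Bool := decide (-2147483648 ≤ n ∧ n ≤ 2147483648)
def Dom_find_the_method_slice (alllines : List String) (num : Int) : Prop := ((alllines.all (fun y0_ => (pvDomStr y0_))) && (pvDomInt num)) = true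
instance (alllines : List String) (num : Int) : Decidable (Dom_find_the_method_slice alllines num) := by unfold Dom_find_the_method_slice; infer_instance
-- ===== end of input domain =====

-- B replaces A's backward early-break scan by one forward pass remembering the last marker index (alternative decomposition, same cost).

-- ===== PORT A =====
-- the 'while num > 0' loop of A: returns the final method_start_line
def pvLoopA (alllines : List String) (num : Int) : Int :=
  if _h : num > 0 then
    if PySem.Str.strip (PySem.List.pyGetD alllines (num - 1) "") = "</graphml>" then num + 1
    else pvLoopA alllines (num - 1)
  else -1
termination_by num.toNat
decreasing_by omega

def find_the_method_slice (alllines : List String) (num : Int) : String × Int :=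
  let method_start_line := pvLoopA alllines num
  if method_start_line > 0 then
    (PySem.Str.strip (PySem.List.pyGetD alllines (method_start_line - 1) ""), method_start_line)
  else ("", method_start_line)

-- ===== PORT B =====
def find_the_method_slice_alt (alllines : List String) (num : Int) : String × Int :=
  let last_idx := (PySem.List.pyRange 0 num 1).foldl
    (fun acc i => if PySem.Str.strip (PySem.List.pyGetD alllines i "") = "</graphml>" then i else acc) (-1)
  if last_idx ≥ 0 then
    (PySem.Str.strip (PySem.List.pyGetD alllines (last_idx + 2 - 1) ""), last_idx + 2)
  else ("", -1)

-- ===== PRECONDITION & SPEC =====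
-- Pre_ excludes exactly the inputs where Python A raises IndexError: num exceeding the list length,
-- or the marker sitting on line num = length (so the method-name access alllines[num] is out of range).
def Pre_find_the_method_slice (alllines : List String) (num : Int) : Prop :=
  num ≤ 0 ∨ (num ≤ (alllines.length : Int) ∧
    ¬(num = (alllines.length : Int) ∧ PySem.Str.strip (alllines.getLast?.getD "") = "</graphml>"))
instance (alllines : List String) (num : Int) : Decidable (Pre_find_the_method_slice alllines num) := by
  unfold Pre_find_the_method_slice; infer_instance

def pvWitness_find_the_method_slice : List String × Int := (["</graphml>", "foo"], 1)

def Spec_find_the_method_slice (alllines : List String) (num : Int) (out : String × Int) : Prop := out = find_the_method_slice_alt alllines num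
instance (alllines : List String) (num : Int) (out : String × Int) : Decidable (Spec_find_the_method_slice alllines num out) := by unfold Spec_find_the_method_slice; infer_instance

-- ===== CLAIM (what is proved, stated in full; the proofs are below) =====
def Claim_equal_find_the_method_slice : Prop := ∀ (alllines : List String) (num : Int), Dom_find_the_method_slice alllines num → Pre_find_the_method_slice alllines num → Spec_find_the_method_slice alllines num (find_the_method_slice alllines num)

-- ===== LEMMAS AND PROOFS =====

def pvLastIdx (alllines : List String) (num : Int) : Int :=
  (PySem.List.pyRange 0 num 1).foldl
    (fun acc i => if PySem.Str.strip (PySem.List.pyGetD alllines i "") = "</graphml>" then i else acc) (-1)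

lemma alt_eq (alllines : List String) (num : Int) :
    find_the_method_slice_alt alllines num =
      if pvLastIdx alllines num ≥ 0 then
        (PySem.Str.strip (PySem.List.pyGetD alllines (pvLastIdx alllines num + 2 - 1) ""),
          pvLastIdx alllines num + 2)
      else ("", -1) := rfl

lemma a_eq (alllines : List String) (num : Int) :
    find_the_method_slice alllines num =
      if pvLoopA alllines num > 0 then
        (PySem.Str.strip (PySem.List.pyGetD alllines (pvLoopA alllines num - 1) ""),
          pvLoopA alllines num)
      else ("", pvLoopA alllines num) := rfl

lemma pvLastIdx_succ (alllines : List String) (k : Nat) :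
    pvLastIdx alllines ((k : Int) + 1) =
      if PySem.Str.strip (PySem.List.pyGetD alllines (k : Int) "") = "</graphml>" then (k : Int)
      else pvLastIdx alllines (k : Int) := by
  unfold pvLastIdx
  rw [PySem.List.pyRange_one_succ_right (by positivity), List.foldl_append]
  simp only [List.foldl_cons, List.foldl_nil]

lemma pvLoopA_eq_lastIdx (alllines : List String) (n : Nat) :
    pvLoopA alllines (n : Int) =
      (if pvLastIdx alllines (n : Int) ≥ 0 then pvLastIdx alllines (n : Int) + 2 else -1) := by
  induction n with
  | zero =>
    rw [pvLoopA]
    simp [pvLastIdx, PySem.List.pyRange_one_eq_nil (by omega : (0:Int) ≤ 0)]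
  | succ k ih =>
    have hk1 : ((k + 1 : Nat) : Int) = (k : Int) + 1 := by push_cast; ring
    rw [pvLoopA, hk1, pvLastIdx_succ]
    rw [dif_pos (by positivity : (k : Int) + 1 > 0)]
    rw [add_sub_cancel_right]
    by_cases hm : PySem.Str.strip (PySem.List.pyGetD alllines (k : Int) "") = "</graphml>"
    · rw [if_pos hm, if_pos hm, if_pos (by positivity : (k : Int) ≥ 0)]; ring
    · rw [if_neg hm, if_neg hm]
      exact ih

lemma pvLoopA_nonpos (alllines : List String) (num : Int) (h : num ≤ 0) :
    pvLoopA alllines num = -1 := by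
  rw [pvLoopA]; simp [not_lt.mpr h]

theorem find_the_method_slice_spec : Claim_equal_find_the_method_slice := by
  intro alllines num _ _
  unfold Spec_find_the_method_slice
  rw [a_eq, alt_eq]
  by_cases hnum : num ≤ 0
  · have hA := pvLoopA_nonpos alllines num hnum
    have hB : pvLastIdx alllines num = -1 := by
      unfold pvLastIdx
      rw [PySem.List.pyRange_one_eq_nil hnum]
      rfl
    rw [hA, hB]
    norm_num
  · have hn : num = ((num.toNat : Nat) : Int) := by omega
    rw [hn, pvLoopA_eq_lastIdx]
    by_cases hL : pvLastIdx alllines ((num.toNat : Nat) : Int) ≥ 0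
    · rw [if_pos hL, if_pos (by omega : pvLastIdx alllines ((num.toNat : Nat) : Int) + 2 > 0), if_pos hL]
    · rw [if_neg hL, if_neg (by norm_num : ¬((-1 : Int) > 0)), if_neg hL]
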